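-- pv_equiv track=rewrite | github.com/jbatteen/NataPOS | is_valid.py | is_valid_price
-- ===== SOURCE A (Python) =====
-- def is_valid_price(input_string=''):
--   if len(input_string) == 0:
--     return False
--   allowed = set("1234567890.$")
--   numbers = set("1234567890")
--   decimal_count = 0
--   number_count = 0
--   dollar_count = 0
--   for i in input_string:
--     if i not in allowed:
--       return False
--     if i in numbers:
--       number_count +=1
--     if i == '$':
--       dollar_count += 1
--     if i == '.':
--       decimal_count += 1
--   if decimal_count > 1:
--     return False
--   if number_count == 0:
--     return False
--   if dollar_count > 1:
--     return False
--   elif dollar_count == 1 and input_string[0] != '$':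
--     return False
--   return True
-- ===== SOURCE B (Python) =====
-- def is_valid_price(input_string=''):
--     body = input_string[1:] if input_string.startswith('$') else input_string
--     digits = sum(c.isdigit() for c in body)
--     dots = body.count('.')
--     return digits >= 1 and dots <= 1 and len(body) == digits + dots
-- ===== Notes on version B (the rewrite author's own statement) =====
-- stated objective: simpler
-- what changed: Replaces the counting loop with three counters and post-hoc checks by stripping an optional leading '$' and validating the remainder arithmetically (digit count >= 1, at most one dot, length equals digits + dots, which forbids any other character).
import Mathlib
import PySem

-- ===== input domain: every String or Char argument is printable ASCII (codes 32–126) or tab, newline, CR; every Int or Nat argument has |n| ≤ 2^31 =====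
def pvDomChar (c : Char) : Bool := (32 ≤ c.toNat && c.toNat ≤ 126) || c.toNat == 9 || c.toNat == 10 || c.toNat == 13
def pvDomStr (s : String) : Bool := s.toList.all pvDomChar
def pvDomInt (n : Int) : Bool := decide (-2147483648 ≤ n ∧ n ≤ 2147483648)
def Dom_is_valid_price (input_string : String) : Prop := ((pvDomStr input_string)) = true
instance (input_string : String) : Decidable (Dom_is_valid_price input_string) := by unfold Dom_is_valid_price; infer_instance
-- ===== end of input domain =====

-- B strips an optional leading '$' and checks the body arithmetically; same return
-- value as A on every input (both total); objective: simpler.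
-- ===== PORT A =====
def pvAllowedA : List Char := "1234567890.$".toList
def pvNumbersA : List Char := "1234567890".toList

-- the for-loop of A: early-return False is `none`, normal fall-through carries the three counters
def pvLoopA : List Char → Int → Int → Int → Option (Int × Int × Int)
  | [], dec, num, dol => some (dec, num, dol)
  | c :: cs, dec, num, dol =>
    if ¬ pvAllowedA.contains c then none
    else
      let num' := if pvNumbersA.contains c then num + 1 else num
      let dol' := if c = '$' then dol + 1 else dol
      let dec' := if c = '.' then dec + 1 else dec
      pvLoopA cs dec' num' dol'

def is_valid_price (input_string : String) : Bool :=
  let l := input_string.toList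
  if l.length = 0 then false
  else
    match pvLoopA l 0 0 0 with
    | none => false                                   -- `return False` inside the loop
    | some (dec, num, dol) =>
      if dec > 1 then false
      else if num = 0 then false
      else if dol > 1 then false
      else if dol = 1 ∧ PySem.List.pyGet? l 0 ≠ some '$' then false   -- input_string[0] != '$'
      else true

-- ===== PORT B =====
def is_valid_price_alt (input_string : String) : Bool :=
  let l := input_string.toList
  let body : List Char := if l.take 1 = ['$'] then l.drop 1 else l   -- startswith('$') / [1:]
  let digits : Nat := body.countP (fun c => c.isDigit)   -- c.isdigit(): exact on ASCII chars
  let dots : Nat := body.count '.'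
  decide (1 ≤ digits) && decide (dots ≤ 1) && (body.length == digits + dots)

-- ===== PRECONDITION & SPEC =====
def Spec_is_valid_price (input_string : String) (out : Bool) : Prop := out = is_valid_price_alt input_string
instance (input_string : String) (out : Bool) : Decidable (Spec_is_valid_price input_string out) := by unfold Spec_is_valid_price; infer_instance

-- ===== CLAIM (what is proved, stated in full; the proofs are below) =====
def Claim_equal_is_valid_price : Prop := ∀ (input_string : String), Dom_is_valid_price input_string → Spec_is_valid_price input_string (is_valid_price input_string)

-- ===== LEMMAS AND PROOFS =====

-- ===== VERDICT (by name: the statement is the Claim_ definition above) =====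
lemma mem_numbersA (c : Char) : pvNumbersA.contains c = c.isDigit := by
  have h : pvNumbersA = ['1','2','3','4','5','6','7','8','9','0'] := rfl
  rw [h, Bool.eq_iff_iff]
  simp only [List.contains_eq_mem, List.mem_cons, List.not_mem_nil, or_false, Char.isDigit,
    Char.ext_iff, decide_eq_true_eq, Bool.and_eq_true, UInt32.le_iff_toNat_le, UInt32.ext_iff,
    show ('0':Char).val.toNat = 48 from rfl, show ('1':Char).val.toNat = 49 from rfl,
    show ('2':Char).val.toNat = 50 from rfl, show ('3':Char).val.toNat = 51 from rfl,
    show ('4':Char).val.toNat = 52 from rfl, show ('5':Char).val.toNat = 53 from rfl,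
    show ('6':Char).val.toNat = 54 from rfl, show ('7':Char).val.toNat = 55 from rfl,
    show ('8':Char).val.toNat = 56 from rfl, show ('9':Char).val.toNat = 57 from rfl]
  omega

lemma mem_allowedA (c : Char) :
    pvAllowedA.contains c = (c.isDigit || c = '.' || c = '$') := by
  have h : pvAllowedA = ['1','2','3','4','5','6','7','8','9','0','.','$'] := rfl
  rw [h, Bool.eq_iff_iff]
  simp only [List.contains_eq_mem, List.mem_cons, List.not_mem_nil, or_false, Char.isDigit,
    Bool.or_eq_true, Char.ext_iff, decide_eq_true_eq, Bool.and_eq_true, UInt32.le_iff_toNat_le,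
    UInt32.ext_iff,
    show ('0':Char).val.toNat = 48 from rfl, show ('1':Char).val.toNat = 49 from rfl,
    show ('2':Char).val.toNat = 50 from rfl, show ('3':Char).val.toNat = 51 from rfl,
    show ('4':Char).val.toNat = 52 from rfl, show ('5':Char).val.toNat = 53 from rfl,
    show ('6':Char).val.toNat = 54 from rfl, show ('7':Char).val.toNat = 55 from rfl,
    show ('8':Char).val.toNat = 56 from rfl, show ('9':Char).val.toNat = 57 from rfl,
    show ('.':Char).val.toNat = 46 from rfl, show ('$':Char).val.toNat = 36 from rfl]
  omega

-- characterization of A's loop: `none` iff some char is disallowed, else the three counts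
lemma pvLoopA_eq (l : List Char) (dec num dol : Int) :
    pvLoopA l dec num dol =
      if l.all (fun c => c.isDigit || c = '.' || c = '$')
      then some (dec + (l.count '.' : Int), num + (l.countP (fun c => c.isDigit) : Int),
                 dol + (l.count '$' : Int))
      else none := by
  induction l generalizing dec num dol with
  | nil => simp [pvLoopA]
  | cons c cs ih =>
    simp only [pvLoopA, mem_allowedA, mem_numbersA, List.all_cons, List.count_cons,
      List.countP_cons]
    by_cases hall : (c.isDigit || decide (c = '.') || decide (c = '$')) = true
    · rw [if_neg (by simp_all), ih]
      split
      · by_cases hd : c = '.' <;> by_cases hg : c.isDigit = true <;> by_cases hs : c = '$' <;>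
          simp_all [Prod.mk.injEq] <;> omega
      · rw [if_neg (by simp_all)]
    · rw [if_pos (by simp_all), if_neg (by simp_all)]

-- digits and dots are disjoint, so their counts sum to at most the length
lemma count_digit_dot_le (l : List Char) :
    l.countP (fun c => c.isDigit) + l.count '.' ≤ l.length := by
  have e4 : ('.':Char).isDigit = false := rfl
  induction l with
  | nil => simp
  | cons c cs ih =>
    simp only [List.countP_cons, List.count_cons, List.length_cons]
    by_cases hg : c.isDigit = true <;> by_cases hd : c = '.' <;>
      simp_all [beq_iff_eq] <;> omega

-- the length equation of B holds iff every char is a digit or a dot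
lemma len_eq_counts_iff (l : List Char) :
    (l.length = l.countP (fun c => c.isDigit) + l.count '.') ↔
      l.all (fun c => c.isDigit || c = '.') = true := by
  have e4 : ('.':Char).isDigit = false := rfl
  induction l with
  | nil => simp
  | cons c cs ih =>
    have h1 := count_digit_dot_le cs
    simp only [List.length_cons, List.countP_cons, List.count_cons, List.all_cons,
      Bool.and_eq_true, Bool.or_eq_true, ← ih]
    clear ih
    by_cases hg : c.isDigit = true <;> by_cases hd : c = '.' <;>
      simp_all [beq_iff_eq] <;> omega

-- if every char is allowed, the length is the sum of the three counts
lemma counts3 (l : List Char)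
    (h : l.all (fun c => c.isDigit || c = '.' || c = '$') = true) :
    l.length = l.countP (fun c => c.isDigit) + l.count '.' + l.count '$' := by
  have e1 : (('.':Char) = '$') = False := by simp
  have e3 : ('$':Char).isDigit = false := rfl
  have e4 : ('.':Char).isDigit = false := rfl
  induction l with
  | nil => simp
  | cons c cs ih =>
    simp only [List.all_cons, Bool.and_eq_true, Bool.or_eq_true, decide_eq_true_eq] at h
    have ih' := ih h.2
    simp only [List.length_cons, List.countP_cons, List.count_cons]
    by_cases hg : c.isDigit = true <;> by_cases hd : c = '.' <;> by_cases hs : c = '$' <;>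
      simp_all [beq_iff_eq] <;> omega

lemma valid_price_eq (s : String) : is_valid_price s = is_valid_price_alt s := by
  rw [Bool.eq_iff_iff]
  cases hl : s.toList with
  | nil => simp [is_valid_price, is_valid_price_alt, hl]
  | cons c cs =>
    have h0 : PySem.List.pyGet? (c :: cs) 0 = some c := PySem.List.pyGet?_zero_cons _ _
    have e1 : (('.':Char) = '$') = False := by simp
    have e3 : ('$':Char).isDigit = false := rfl
    have e4 : ('.':Char).isDigit = false := rfl
    by_cases hall : ((c :: cs).all (fun c => c.isDigit || c = '.' || c = '$')) = true
    · have h3 := counts3 _ hall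
      simp only [is_valid_price, is_valid_price_alt, hl, pvLoopA_eq, if_pos hall, h0,
        List.length_cons, Nat.succ_ne_zero, if_false, zero_add, gt_iff_lt,
        Bool.and_eq_true, decide_eq_true_eq, beq_iff_eq, ne_eq]
      by_cases hc : c = '$'
      · subst hc
        rw [if_pos (show List.take 1 ('$' :: cs) = ['$'] from rfl)]
        simp only [List.count_cons, List.countP_cons, List.drop, e3,
          show (('$':Char) == '.') = false from rfl, show (('$':Char) == '$') = true from rfl,
          Bool.false_eq_true, if_false, if_true, List.length_cons, Option.some.injEq,
          show (('$':Char) = '$') = True by simp, not_true, and_false] at h3 ⊢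
        split_ifs <;> simp only [Bool.false_eq_true, false_iff, eq_self_iff_true, true_iff] <;>
          omega
      · rw [if_neg (show ¬ List.take 1 (c :: cs) = ['$'] by simp [List.take_succ_cons, hc])]
        have hcb : (c == '$') = false := by simp [hc]
        have hhead : c.isDigit = true ∨ c = '.' := by
          have h := hall
          simp only [List.all_cons, Bool.and_eq_true, Bool.or_eq_true, decide_eq_true_eq] at h
          rcases h.1 with (h' | h') | h'
          · exact Or.inl h'
          · exact Or.inr h'
          · exact absurd h' hc
        simp only [List.count_cons, List.countP_cons, hcb, Bool.false_eq_true, if_false,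
          List.length_cons, Option.some.injEq, show (c = '$') = False by simp [hc],
          not_false_iff, and_true] at h3 ⊢
        rcases hhead with hg | hg
        · have hnd : (c == '.') = false := by
            have hne : ¬ c = '.' := by rintro rfl; simp [e4] at hg
            simp [hne]
          simp only [hg, hnd, Bool.false_eq_true, if_false, eq_self_iff_true, if_true] at h3 ⊢
          split_ifs <;> simp only [Bool.false_eq_true, false_iff, eq_self_iff_true, true_iff] <;>
            omega
        · subst hg
          simp only [show (('.':Char) == '.') = true from rfl, e4, Bool.false_eq_true, if_false,
            eq_self_iff_true, if_true] at h3 ⊢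
          split_ifs <;> simp only [Bool.false_eq_true, false_iff, eq_self_iff_true, true_iff] <;>
            omega
    · simp only [is_valid_price, is_valid_price_alt, hl, pvLoopA_eq, if_neg hall,
        List.length_cons, Nat.succ_ne_zero, if_false, Bool.false_eq_true, false_iff,
        Bool.and_eq_true, decide_eq_true_eq, beq_iff_eq, not_and]
      intro _ hlen
      -- B's length equation forces every body char to be a digit or dot, contradicting hall
      by_cases hc : List.take 1 (c :: cs) = ['$']
      · have hcq : c = '$' := by simpa [List.take_succ_cons] using hc
        rw [if_pos hc] at hlen
        have hcs := (len_eq_counts_iff cs).mp hlen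
        apply hall
        subst hcq
        simp only [List.all_cons, Bool.and_eq_true, Bool.or_eq_true]
        refine ⟨by simp, ?_⟩
        rw [List.all_eq_true] at hcs ⊢
        intro x hx
        have := hcs x hx
        simp_all
      · rw [if_neg hc] at hlen
        have hcs := (len_eq_counts_iff _).mp hlen
        apply hall
        rw [List.all_eq_true] at hcs ⊢
        intro x hx
        have := hcs x hx
        simp_all

-- ===== VERDICT (by name: the statement is the Claim_ definition above) =====
theorem is_valid_price_spec : Claim_equal_is_valid_price := by
  intro s _
  unfold Spec_is_valid_price
  exact valid_price_eq s
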